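-- pv_equiv track=rewrite | github.com/Grace0320/NLPA1 | buildarff.py | feat17
-- ===== SOURCE A (Python) =====
-- def getTokenOnlyFreqDict(tweet):
-- 	freqDict = {}
-- 	#discard A=
-- 	lines = tweet.split("\n")
-- 	for line in lines[1:]:
-- 		tokens = line.split()
-- 		for t in tokens:
-- 			w = t.split("/")
-- 			if w[0] in freqDict:
-- 				freqDict[w[0]] += 1
-- 			else:
-- 				freqDict[w[0]] = 1
-- 	return freqDict
--
-- def feat17(tweet): #words all in upper case min 2 letters
-- 	tokenDict = getTokenOnlyFreqDict(tweet)
-- 	count = 0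
-- 	for token in tokenDict:
-- 		if len(token) > 2:
-- 			if token.isupper():
-- 				count += tokenDict[token]
-- 	return count
-- ===== SOURCE B (Python) =====
-- def feat17(tweet):  # words all in upper case min 2 letters
--     # single fused pass: no frequency dict, count each qualifying occurrence directly
--     count = 0
--     for line in tweet.split("\n")[1:]:
--         for t in line.split():
--             w = t.split("/")[0]
--             if len(w) > 2 and w.isupper():
--                 count += 1
--     return count
-- ===== Notes on version B (the rewrite author's own statement) =====
-- stated objective: simpler
-- what changed: Drops the helper and the frequency dict: one fused pass over the tokens adds 1 per qualifying occurrence instead of building a full token->count dict and then summing the counts of qualifying distinct keys.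
import Mathlib
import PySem

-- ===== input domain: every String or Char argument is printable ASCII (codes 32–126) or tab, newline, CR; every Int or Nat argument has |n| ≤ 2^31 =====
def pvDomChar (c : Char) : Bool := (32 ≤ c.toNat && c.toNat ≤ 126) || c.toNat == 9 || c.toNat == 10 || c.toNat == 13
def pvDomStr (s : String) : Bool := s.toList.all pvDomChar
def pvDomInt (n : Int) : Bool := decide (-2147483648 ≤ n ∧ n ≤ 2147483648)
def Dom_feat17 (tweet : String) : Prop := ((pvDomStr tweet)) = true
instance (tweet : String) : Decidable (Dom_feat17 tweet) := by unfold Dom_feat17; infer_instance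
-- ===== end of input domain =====

-- B replaces A's build-a-frequency-dict-then-sum-over-distinct-keys with one fused pass that
-- adds 1 per qualifying token occurrence (objective: simpler).

-- Python's str.isupper(), ported by hand: at least one cased character and no lowercase one.
-- Exact on the ASCII domain (where the cased characters are exactly the letters).
def pyIsupper (s : String) : Bool :=
  s.toList.any PySem.Chars.isupper && !(s.toList.any PySem.Chars.islower)

-- ===== PORT A =====
def getTokenOnlyFreqDict (tweet : String) : PySem.Dict String Int :=
  let lines := (PySem.Str.split? tweet "\n").getD []   -- sep ≠ "", so split? is some
  (PySem.List.slice lines (some 1) none).foldl (fun freqDict line =>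
    (PySem.Str.split₀ line).foldl (fun freqDict t =>
      let w := ((PySem.Str.split? t "/").getD []).headD ""   -- w[0]; split's result is never empty
      if freqDict.contains w then freqDict.modify w 0 (· + 1) else freqDict.insert w 1)
      freqDict)
    PySem.Dict.empty

def feat17 (tweet : String) : Int :=
  let tokenDict := getTokenOnlyFreqDict tweet
  tokenDict.keys.foldl (fun count token =>
    if PySem.Str.len token > 2 then
      if pyIsupper token then count + tokenDict.getD token 0 else count
    else count) 0

-- ===== PORT B =====
def feat17_alt (tweet : String) : Int :=
  (((PySem.Str.split? tweet "\n").getD []).drop 1).foldl (fun count line =>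
    (PySem.Str.split₀ line).foldl (fun count t =>
      let w := ((PySem.Str.split? t "/").getD []).headD ""
      if w.length > 2 && pyIsupper w then count + 1 else count)
      count)
    0

-- ===== PRECONDITION & SPEC =====
def Spec_feat17 (tweet : String) (out : Int) : Prop := out = feat17_alt tweet
instance (tweet : String) (out : Int) : Decidable (Spec_feat17 tweet out) := by unfold Spec_feat17; infer_instance

-- ===== CLAIM (what is proved, stated in full; the proofs are below) =====
def Claim_equal_feat17 : Prop := ∀ (tweet : String), Dom_feat17 tweet → Spec_feat17 tweet (feat17 tweet)

-- ===== LEMMAS AND PROOFS =====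

-- the word extracted from a token, and the flattened multiset of words of a tweet
def pvKey (t : String) : String := ((PySem.Str.split? t "/").getD []).headD ""

def pvWords (tweet : String) : List String :=
  ((((PySem.Str.split? tweet "\n").getD []).drop 1).flatMap PySem.Str.split₀).map pvKey

def pvCond (k : String) : Bool := decide (k.length > 2) && pyIsupper k

-- A's dict-update step is Counter's step
lemma stepA_eq_modify (d : PySem.Dict String Int) (k : String) :
    (if d.contains k then d.modify k 0 (· + 1) else d.insert k 1) = d.modify k 0 (· + 1) := by
  by_cases h : d.contains k = true
  · simp [h]
  · simp only [Bool.not_eq_true] at h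
    simp [h, PySem.Dict.modify, PySem.Dict.getD_of_not_contains _ _ h]

lemma freqDict_eq_counter (tweet : String) :
    getTokenOnlyFreqDict tweet = PySem.Dict.counter (pvWords tweet) := by
  show (PySem.List.slice ((PySem.Str.split? tweet "\n").getD []) (some 1) none).foldl _ _ = _
  unfold pvWords
  rw [PySem.List.slice_from _ (by norm_num : (0:Int) ≤ 1)]
  rw [← List.foldl_flatMap]
  rw [show (Int.toNat 1) = 1 from rfl]
  rw [PySem.Dict.counter_eq_foldl, List.foldl_map]
  apply PySem.List.foldl_congr_mem
  intro d t _
  exact stepA_eq_modify d (pvKey t)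

lemma sum_indicator (l : List String) (w : String) :
    (l.map (fun k => if k == w then (1 : Int) else 0)).sum = (l.count w : Int) := by
  induction l with
  | nil => simp
  | cons x xs ih =>
    simp only [List.map_cons, List.sum_cons, ih, List.count_cons]
    push_cast
    by_cases hxw : x = w
    · subst hxw; simp; omega
    · simp [hxw, Ne.symm hxw]

lemma sum_counts (keysl : List String) (hnd : keysl.Nodup) :
    ∀ ws : List String, (∀ x ∈ ws, x ∈ keysl) →
      ((keysl.filter pvCond).map (fun k => (ws.count k : Int))).sum = (ws.countP pvCond : Int) := by
  intro ws
  induction ws with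
  | nil => intro _; simp
  | cons w ws ih =>
    intro hmem
    have hws : ∀ x ∈ ws, x ∈ keysl := fun x hx => hmem x (List.mem_cons_of_mem _ hx)
    have hw : w ∈ keysl := hmem w (List.mem_cons_self)
    have expand : ((keysl.filter pvCond).map (fun k => ((w :: ws).count k : Int))).sum
        = ((keysl.filter pvCond).map (fun k => (ws.count k : Int))).sum
          + ((keysl.filter pvCond).map (fun k => if k == w then (1 : Int) else 0)).sum := by
      rw [← List.sum_map_add]
      apply congrArg
      apply List.map_congr_left
      intro k _
      simp only [List.count_cons]
      push_cast
      by_cases hkw : k = w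
      · subst hkw; simp
      · simp [hkw, Ne.symm hkw]
    rw [expand, ih hws, sum_indicator]
    by_cases hc : pvCond w = true
    · rw [List.count_filter hc, List.count_eq_one_of_mem hnd hw]
      simp [List.countP_cons, hc]
    · have hnot : w ∉ keysl.filter pvCond := fun hmem2 => hc (List.of_mem_filter hmem2)
      rw [List.count_eq_zero_of_not_mem hnot]
      simp [List.countP_cons, hc]

lemma foldl_if_add (f : String → Int) :
    ∀ (l : List String) (a : Int),
      l.foldl (fun c k => if pvCond k then c + f k else c) a = a + ((l.filter pvCond).map f).sum := by
  intro l
  induction l with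
  | nil => intro a; simp
  | cons x xs ih => intro a; by_cases h : pvCond x = true <;> simp [h, ih] <;> ring

lemma foldl_count (p : String → Bool) (l : List String) :
    ∀ (a : Int), l.foldl (fun c k => if p k then c + 1 else c) a = a + (l.countP p : Int) := by
  induction l with
  | nil => intro a; simp
  | cons x xs ih =>
    intro a
    by_cases h : p x = true <;> simp [h, ih, List.countP_cons] <;> push_cast <;> ring

lemma feat17_eq_countP (tweet : String) :
    feat17 tweet = ((pvWords tweet).countP pvCond : Int) := by
  show (getTokenOnlyFreqDict tweet).keys.foldl _ 0 = _
  rw [freqDict_eq_counter, PySem.Dict.keys_counter]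
  have hstep : ∀ (c : Int) (k : String), k ∈ PySem.Set.ofList (pvWords tweet) →
      (if PySem.Str.len k > 2 then
          if pyIsupper k then c + (PySem.Dict.counter (pvWords tweet)).getD k 0 else c
        else c)
      = (if pvCond k then c + ((pvWords tweet).count k : Int) else c) := by
    intro c k _
    rw [PySem.Dict.getD_counter]
    have hlen : PySem.Str.len k = k.length := by simp [PySem.Str.len]
    unfold pvCond
    rw [hlen]
    by_cases h1 : k.length > 2 <;> by_cases h2 : pyIsupper k = true <;> simp [h1, h2]
  refine (PySem.List.foldl_congr_mem _ _ _ _ hstep).trans ?_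
  rw [foldl_if_add]
  rw [sum_counts (PySem.Set.ofList (pvWords tweet)) (PySem.Set.nodup_ofList _) (pvWords tweet)
    (fun x hx => (PySem.Set.mem_ofList _ _).mpr hx)]
  ring

lemma feat17_alt_eq_countP (tweet : String) :
    feat17_alt tweet = ((pvWords tweet).countP pvCond : Int) := by
  show (((PySem.Str.split? tweet "\n").getD []).drop 1).foldl _ 0 = _
  rw [← List.foldl_flatMap]
  have hstep : ∀ (c : Int) (t : String),
      t ∈ (((PySem.Str.split? tweet "\n").getD []).drop 1).flatMap (fun line => PySem.Str.split₀ line) →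
      (if (((PySem.Str.split? t "/").getD []).headD "").length > 2
          && pyIsupper (((PySem.Str.split? t "/").getD []).headD "") then c + 1 else c)
      = (if pvCond (pvKey t) then c + 1 else c) := by
    intro c t _
    simp [pvCond, pvKey]
  refine (PySem.List.foldl_congr_mem _ _ _ _ hstep).trans ?_
  unfold pvWords
  rw [List.countP_map]
  exact (foldl_count (fun t => pvCond (pvKey t)) _ 0).trans (by simp only [Function.comp_def]; norm_num)

-- ===== VERDICT (by name: the statement is the Claim_ definition above) =====
theorem feat17_spec : Claim_equal_feat17 := by
  intro tweet _
  unfold Spec_feat17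
  rw [feat17_eq_countP, feat17_alt_eq_countP]
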